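-- pv_equiv track=rewrite | github.com/BettinaCarague/ITMGT | Formative Assessment 4.py | telephone_decipher
-- ===== SOURCE A (Python) =====
-- def telephone_decipher(telephone_string):
--
--     decipher_dict = {
--         "0":" ",
--         '2': 'A',
--         '22': 'B',
--         '222': 'C',
--         '3': 'D',
--         '33': 'E',
--         '333': 'F',
--         '4': 'G',
--         '44': 'H',
--         '444': 'I',
--         '5': 'J',
--         '55': 'K',
--         '555': 'L',
--         '6': 'M',
--         '66': 'N',
--         '666': 'O',
--         '7': 'P',
--         '77': 'Q',
--         '777': 'R',
--         '7777': 'S',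
--         '8': 'T',
--         '88': 'U',
--         '888': 'V',
--         '9': 'W',
--         '99': 'X',
--         '999': 'Y',
--         '9999': 'Z'
--     }
--
--     new_message = ""
--
--     i = 0
--     while i < len(telephone_string):
--         for j in range(4, 0, -1):
--             if i+j <= len(telephone_string):
--                 chunk = telephone_string[i:i+j]
--                 if chunk in decipher_dict:
--                     new_message += decipher_dict[chunk]
--                     i += j
--                     break
--         else:
--             i += 1
--
--     return new_message
-- ===== SOURCE B (Python) =====
-- def telephone_decipher(telephone_string):
--     letters = {'0': ' ', '2': 'ABC', '3': 'DEF', '4': 'GHI', '5': 'JKL',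
--                '6': 'MNO', '7': 'PQRS', '8': 'TUV', '9': 'WXYZ'}
--     pieces = []
--     i = 0
--     n = len(telephone_string)
--     while i < n:
--         c = telephone_string[i]
--         j = i
--         while j < n and telephone_string[j] == c:
--             j += 1
--         run = j - i                      # maximal run of identical characters
--         if c in letters:
--             ls = letters[c]
--             m = len(ls)                  # presses needed for the last letter on key c
--             pieces.append(ls[m - 1] * (run // m))
--             r = run % m
--             if r:
--                 pieces.append(ls[r - 1])
--         i = j
--     return ''.join(pieces)
-- ===== Notes on version B (the rewrite author's own statement) =====
-- stated objective: faster
-- what changed: A scans position by position, greedily testing dict membership of slices of length 4,3,2,1 at each index; B instead splits the string into maximal runs of identical characters in one pass and decodes each whole run arithmetically (run//m copies of the key's last letter plus the run%m remainder letter) from a per-digit letters table, so the per-character slice building and repeated dict probes disappear.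
import Mathlib
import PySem

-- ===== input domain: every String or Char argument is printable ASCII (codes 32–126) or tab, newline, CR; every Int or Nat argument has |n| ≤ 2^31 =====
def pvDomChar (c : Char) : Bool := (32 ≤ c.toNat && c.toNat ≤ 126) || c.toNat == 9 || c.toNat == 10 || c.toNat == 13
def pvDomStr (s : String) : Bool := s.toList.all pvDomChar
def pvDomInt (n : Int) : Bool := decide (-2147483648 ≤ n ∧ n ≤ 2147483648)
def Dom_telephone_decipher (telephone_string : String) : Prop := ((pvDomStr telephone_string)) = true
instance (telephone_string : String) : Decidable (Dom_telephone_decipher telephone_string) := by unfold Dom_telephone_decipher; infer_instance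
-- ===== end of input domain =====

-- B replaces A's positional greedy scan (try chunks of length 4..1 at each index) by a single
-- group-runs pass: each maximal run of one key is decoded by division/remainder, dropping the
-- per-position slice/dict probes (measured faster in a timing run).

-- ===== PORT A =====
def decipherDict : PySem.Dict String String :=
  PySem.Dict.ofList [("0", " "), ("2", "A"), ("22", "B"), ("222", "C"), ("3", "D"), ("33", "E"),
    ("333", "F"), ("4", "G"), ("44", "H"), ("444", "I"), ("5", "J"), ("55", "K"), ("555", "L"),
    ("6", "M"), ("66", "N"), ("666", "O"), ("7", "P"), ("77", "Q"), ("777", "R"), ("7777", "S"),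
    ("8", "T"), ("88", "U"), ("888", "V"), ("9", "W"), ("99", "X"), ("999", "Y"), ("9999", "Z")]

-- one test of the inner `for j in range(4, 0, -1)`: under the guard `i + j <= len(...)`,
-- look up the slice `telephone_string[i:i+j]` (slice = drop/take, i + j in range) in the dict
def chunkA (s : List Char) (i j : Nat) : Option String :=
  if i + j ≤ s.length then decipherDict.get? (String.ofList ((s.drop i).take j)) else none

-- the `while i < len(...)` loop; the inner for/else with `break` is unrolled (j = 4, 3, 2, 1);
-- the final `none` branch is the for-else `i += 1`
def tdLoop (s : List Char) (i : Nat) (acc : String) : String :=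
  if _h : i < s.length then
    match chunkA s i 4 with
    | some v => tdLoop s (i + 4) (acc ++ v)
    | none =>
      match chunkA s i 3 with
      | some v => tdLoop s (i + 3) (acc ++ v)
      | none =>
        match chunkA s i 2 with
        | some v => tdLoop s (i + 2) (acc ++ v)
        | none =>
          match chunkA s i 1 with
          | some v => tdLoop s (i + 1) (acc ++ v)
          | none => tdLoop s (i + 1) acc
  else acc
  termination_by s.length - i
  decreasing_by all_goals omega

def telephone_decipher (telephone_string : String) : String :=
  tdLoop telephone_string.toList 0 ""

-- ===== PORT B =====
def lettersDict : PySem.Dict Char String :=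
  PySem.Dict.ofList [('0', " "), ('2', "ABC"), ('3', "DEF"), ('4', "GHI"), ('5', "JKL"),
    ('6', "MNO"), ('7', "PQRS"), ('8', "TUV"), ('9', "WXYZ")]

-- the `if c in letters` body of B's loop, for one maximal run of `run` copies of c
def runPiece (c : Char) (run : Nat) : String :=
  match lettersDict.get? c with
  | none => ""
  | some ls =>
    let l := ls.toList
    let m := l.length
    String.ofList (List.replicate (run / m) (l.getD (m - 1) ' ')) ++
      (if run % m > 0 then String.ofList [l.getD (run % m - 1) ' '] else "")

-- B's outer while: peel one maximal run of identical characters per iteration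
-- (the inner `while j < n and telephone_string[j] == c` scan = takeWhile/dropWhile)
def tdAltLoop (s : List Char) (out : String) : String :=
  match s with
  | [] => out
  | c :: rest =>
    tdAltLoop (rest.dropWhile (· == c)) (out ++ runPiece c (1 + (rest.takeWhile (· == c)).length))
  termination_by s.length
  decreasing_by
    simp only [List.length_cons]
    exact Nat.lt_succ_of_le (List.length_dropWhile_le _ _)

def telephone_decipher_alt (telephone_string : String) : String :=
  tdAltLoop telephone_string.toList ""

-- ===== PRECONDITION & SPEC =====
def Spec_telephone_decipher (telephone_string : String) (out : String) : Prop := out = telephone_decipher_alt telephone_string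
instance (telephone_string : String) (out : String) : Decidable (Spec_telephone_decipher telephone_string out) := by unfold Spec_telephone_decipher; infer_instance

-- ===== CLAIM (what is proved, stated in full; the proofs are below) =====
def Claim_equal_telephone_decipher : Prop := ∀ (telephone_string : String), Dom_telephone_decipher telephone_string → Spec_telephone_decipher telephone_string (telephone_decipher telephone_string)

-- ===== LEMMAS AND PROOFS =====

-- the value A's dict assigns to a run of j copies of a, phrased through B's letters table
def runVal (a : Char) (j : Nat) : Option String :=
  match lettersDict.get? a with
  | none => none
  | some ls =>
    if j ≤ ls.toList.length then some (String.ofList [ls.toList.getD (j - 1) ' ']) else none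

theorem lettersDict_mk : lettersDict = PySem.Dict.mk [('0', " "), ('2', "ABC"), ('3', "DEF"),
    ('4', "GHI"), ('5', "JKL"), ('6', "MNO"), ('7', "PQRS"), ('8', "TUV"), ('9', "WXYZ")] := by decide

theorem decipherDict_keys : decipherDict.keys = ["0", "2", "22", "222", "3", "33", "333", "4",
    "44", "444", "5", "55", "555", "6", "66", "666", "7", "77", "777", "7777", "8", "88", "888",
    "9", "99", "999", "9999"] := by decide

-- a key of A's dict that is not a uniform run of one character does not exist
theorem no_key (a d : Char) (tl : List Char) (k : Nat) (hk : 1 ≤ k) (hd : d ≠ a) :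
    decipherDict.get? (String.ofList (List.replicate k a ++ d :: tl)) = none := by
  rw [PySem.Dict.get?_eq_none_iff_not_mem_keys]
  intro hmem
  rw [decipherDict_keys] at hmem
  simp only [List.mem_cons, List.not_mem_nil, or_false] at hmem
  have hw : ∀ (s : String), String.ofList (List.replicate k a ++ d :: tl) = s →
      List.replicate k a ++ d :: tl = s.toList := by
    intro s hs; rw [← hs, String.toList_ofList]
  have key : ∃ (n : Nat) (c : Char), List.replicate k a ++ d :: tl = List.replicate n c := by
    rcases hmem with h|h|h|h|h|h|h|h|h|h|h|h|h|h|h|h|h|h|h|h|h|h|h|h|h|h|h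
    exacts [⟨1, '0', hw _ h⟩, ⟨1, '2', hw _ h⟩, ⟨2, '2', hw _ h⟩, ⟨3, '2', hw _ h⟩,
      ⟨1, '3', hw _ h⟩, ⟨2, '3', hw _ h⟩, ⟨3, '3', hw _ h⟩, ⟨1, '4', hw _ h⟩, ⟨2, '4', hw _ h⟩,
      ⟨3, '4', hw _ h⟩, ⟨1, '5', hw _ h⟩, ⟨2, '5', hw _ h⟩, ⟨3, '5', hw _ h⟩, ⟨1, '6', hw _ h⟩,
      ⟨2, '6', hw _ h⟩, ⟨3, '6', hw _ h⟩, ⟨1, '7', hw _ h⟩, ⟨2, '7', hw _ h⟩, ⟨3, '7', hw _ h⟩,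
      ⟨4, '7', hw _ h⟩, ⟨1, '8', hw _ h⟩, ⟨2, '8', hw _ h⟩, ⟨3, '8', hw _ h⟩, ⟨1, '9', hw _ h⟩,
      ⟨2, '9', hw _ h⟩, ⟨3, '9', hw _ h⟩, ⟨4, '9', hw _ h⟩]
  obtain ⟨n, c, hc⟩ := key
  have ha : a ∈ List.replicate n c := by
    rw [← hc]
    exact List.mem_append_left _ (by simp [List.mem_replicate]; omega)
  have hdm : d ∈ List.replicate n c := by
    rw [← hc]
    exact List.mem_append_right _ (List.mem_cons_self)
  exact hd ((List.eq_of_mem_replicate hdm).trans (List.eq_of_mem_replicate ha).symm)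

-- a run of a character B's letters table does not know is not a key of A's dict
theorem run_not_key (a : Char) (j : Nat) (hj : 1 ≤ j) (hL : lettersDict.get? a = none) :
    decipherDict.get? (String.ofList (List.replicate j a)) = none := by
  rw [PySem.Dict.get?_eq_none_iff_not_mem_keys]
  intro hmem
  rw [decipherDict_keys] at hmem
  simp only [List.mem_cons, List.not_mem_nil, or_false] at hmem
  have ham : a ∈ List.replicate j a := by simp [List.mem_replicate]; omega
  have key_head : ∀ (s : String), String.ofList (List.replicate j a) = s → a ∈ s.toList := by
    intro s hs; rw [← hs, String.toList_ofList]; exact ham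
  rcases hmem with h|h|h|h|h|h|h|h|h|h|h|h|h|h|h|h|h|h|h|h|h|h|h|h|h|h|h <;>
    (have hx := key_head _ h; simp at hx; subst hx; exact absurd hL (by decide))

-- A's dict on a run of j copies of a computes runVal a j
theorem key_run (a : Char) (j : Nat) (hj : 1 ≤ j) (hj4 : j ≤ 4) :
    decipherDict.get? (String.ofList (List.replicate j a)) = runVal a j := by
  rcases eq_or_ne a '0' with rfl | h0
  · interval_cases j <;> decide
  rcases eq_or_ne a '2' with rfl | h2
  · interval_cases j <;> decide
  rcases eq_or_ne a '3' with rfl | h3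
  · interval_cases j <;> decide
  rcases eq_or_ne a '4' with rfl | h4
  · interval_cases j <;> decide
  rcases eq_or_ne a '5' with rfl | h5
  · interval_cases j <;> decide
  rcases eq_or_ne a '6' with rfl | h6
  · interval_cases j <;> decide
  rcases eq_or_ne a '7' with rfl | h7
  · interval_cases j <;> decide
  rcases eq_or_ne a '8' with rfl | h8
  · interval_cases j <;> decide
  rcases eq_or_ne a '9' with rfl | h9
  · interval_cases j <;> decide
  have hL : lettersDict.get? a = none := by
    simp [lettersDict_mk, Ne.symm h0, Ne.symm h2, Ne.symm h3,
      Ne.symm h4, Ne.symm h5, Ne.symm h6, Ne.symm h7, Ne.symm h8, Ne.symm h9, PySem.Dict.get?]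
  rw [run_not_key a j hj hL]
  simp [runVal, hL]

-- bounds of the letters strings
theorem letters_len (a : Char) (ls : String) (h : lettersDict.get? a = some ls) :
    1 ≤ ls.toList.length ∧ ls.toList.length ≤ 4 := by
  rw [lettersDict_mk] at h
  simp only [PySem.Dict.get?_mk_cons] at h
  split_ifs at h
  all_goals first
    | (injection h with h; subst h; decide)
    | (simp [PySem.Dict.get?] at h)

theorem head?_dropWhile_ne (p : Char → Bool) (l : List Char) (x : Char)
    (h : (l.dropWhile p).head? = some x) : p x = false := by
  induction l with
  | nil => simp [List.dropWhile] at h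
  | cons y ys ih =>
    rw [List.dropWhile_cons] at h
    by_cases hy : p y = true
    · rw [if_pos hy] at h; exact ih h
    · rw [if_neg hy] at h; simp at h; rw [← h]; simpa using hy

theorem takeWhile_eq_nil_of_head (p : Char → Bool) (l : List Char)
    (h : ∀ x, l.head? = some x → p x = false) : l.takeWhile p = [] := by
  cases l with
  | nil => rfl
  | cons y ys => rw [List.takeWhile_cons, h y rfl]; rfl

theorem dropWhile_eq_self_of_head (p : Char → Bool) (l : List Char)
    (h : ∀ x, l.head? = some x → p x = false) : l.dropWhile p = l := by
  cases l with
  | nil => rfl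
  | cons y ys => simp [h y rfl]

-- B's loop consumes a whole maximal run in one step
theorem alt_run_eval (a : Char) (k : Nat) (u : List Char) (out : String) (hk : 1 ≤ k)
    (hu : ∀ x, u.head? = some x → (x == a) = false) :
    tdAltLoop (List.replicate k a ++ u) out = tdAltLoop u (out ++ runPiece a k) := by
  have hrep : List.replicate k a ++ u = a :: (List.replicate (k - 1) a ++ u) := by
    rw [show k = (k - 1) + 1 from by omega, List.replicate_succ]; simp
  have hpos : ∀ x ∈ List.replicate (k - 1) a, (x == a) = true := by
    intro x hx; simp [List.eq_of_mem_replicate hx]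
  have hdw : List.dropWhile (fun b => b == a) u = u := dropWhile_eq_self_of_head _ _ hu
  have htwu : List.takeWhile (fun b => b == a) u = [] := takeWhile_eq_nil_of_head _ _ hu
  rw [hrep, tdAltLoop, List.takeWhile_append_of_pos hpos, List.dropWhile_append_of_pos hpos,
    htwu, hdw]
  rw [show 1 + (List.replicate (k - 1) a ++ ([] : List Char)).length = k from by simp; omega]

-- splitting one maximal run: the first m presses make the last letter of the key
theorem runPiece_split (a : Char) (ls : String) (hL : lettersDict.get? a = some ls) (k : Nat)
    (hm : ls.toList.length < k) :
    runPiece a k = String.ofList [ls.toList.getD (ls.toList.length - 1) ' '] ++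
      runPiece a (k - ls.toList.length) := by
  have hm1 : 1 ≤ ls.toList.length := (letters_len a ls hL).1
  obtain ⟨k2, rfl⟩ : ∃ k2, k = k2 + ls.toList.length := ⟨k - ls.toList.length, by omega⟩
  rw [Nat.add_sub_cancel]
  simp only [runPiece, hL]
  rw [Nat.add_div_right _ (by omega), Nat.add_mod_right, List.replicate_succ,
    show ∀ (x : Char) (q : Nat), (x :: List.replicate q x) = [x] ++ List.replicate q x from
      fun _ _ => rfl,
    String.ofList_append, String.append_assoc]

-- a short run (at most one keypress group) is decoded as a single letter
theorem runPiece_small (a : Char) (ls : String) (hL : lettersDict.get? a = some ls) (k : Nat)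
    (hk : 1 ≤ k) (hm : k ≤ ls.toList.length) :
    runPiece a k = String.ofList [ls.toList.getD (k - 1) ' '] := by
  have hm1 : 1 ≤ ls.toList.length := (letters_len a ls hL).1
  simp only [runPiece, hL]
  rcases Nat.lt_or_ge k ls.toList.length with hlt | hge
  · rw [Nat.div_eq_of_lt hlt, Nat.mod_eq_of_lt hlt, if_pos (by omega)]
    simp [String.empty_append]
  · have hkm : k = ls.toList.length := by omega
    rw [hkm, Nat.div_self (by omega), Nat.mod_self]
    simp [String.append_empty]

-- evaluation of A's chunk test against the run decomposition of the remaining input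
theorem chunkA_eval (s : List Char) (a : Char) (i j k : Nat) (u : List Char) (hj : 1 ≤ j)
    (hj4 : j ≤ 4) (hi : i ≤ s.length) (ht : s.drop i = List.replicate k a ++ u) (hk : 1 ≤ k)
    (hu : ∀ x, u.head? = some x → (x == a) = false) :
    chunkA s i j = if j ≤ k then runVal a j else none := by
  have hlen : (s.drop i).length = s.length - i := List.length_drop
  have hlen2 : (s.drop i).length = k + u.length := by rw [ht]; simp
  unfold chunkA
  rcases Nat.lt_or_ge k j with hjk | hjk
  · rw [show (if j ≤ k then runVal a j else none) = none from if_neg (by omega)]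
    by_cases hguard : i + j ≤ s.length
    · rw [if_pos hguard, ht]
      have hu' : u ≠ [] := by
        intro hnil; rw [hnil] at hlen2; simp at hlen2; omega
      obtain ⟨d, u', rfl⟩ := List.exists_cons_of_ne_nil hu'
      have hd : d ≠ a := by
        have := hu d rfl; simpa using this
      have h1 : (List.replicate k a ++ d :: u').take j
          = List.replicate k a ++ (d :: u'.take (j - k - 1)) := by
        rw [List.take_append, List.take_of_length_le (by simp; omega),
          show j - (List.replicate k a).length = (j - k - 1) + 1 from by simp; omega,
          List.take_succ_cons]
      rw [h1]
      exact no_key a d _ k hk hd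
    · rw [if_neg hguard]
  · rw [if_pos (by omega), if_pos hjk, ht, List.take_append_of_le_length (by simp; omega),
      List.take_replicate, Nat.min_eq_left hjk]
    exact key_run a j hj hj4

-- the main loop invariant: A's scan from index i equals B's run loop on the remaining suffix
theorem loop_eq (N : Nat) : ∀ (s : List Char) (i : Nat) (acc : String), s.length - i ≤ N →
    tdLoop s i acc = tdAltLoop (s.drop i) acc := by
  induction N with
  | zero =>
    intro s i acc hN
    rw [tdLoop, dif_neg (by omega), List.drop_eq_nil_of_le (by omega), tdAltLoop]
  | succ N ih =>
    intro s i acc hN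
    by_cases hlt : i < s.length
    case neg => rw [tdLoop, dif_neg hlt, List.drop_eq_nil_of_le (by omega), tdAltLoop]
    obtain ⟨a, rest, ht⟩ : ∃ a rest, s.drop i = a :: rest := by
      cases hd : s.drop i with
      | nil =>
        exfalso
        have := List.length_drop (l := s) (i := i)
        rw [hd] at this; simp at this; omega
      | cons a rest => exact ⟨a, rest, rfl⟩
    have hrest : rest = rest.takeWhile (· == a) ++ rest.dropWhile (· == a) :=
      (List.takeWhile_append_dropWhile).symm
    have htw : rest.takeWhile (· == a) = List.replicate (rest.takeWhile (· == a)).length a := by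
      apply List.eq_replicate_of_mem
      intro b hb
      have := List.mem_takeWhile_imp hb
      simpa using this
    set k := 1 + (rest.takeWhile (· == a)).length with hkdef
    set u := rest.dropWhile (· == a) with hudef
    have hk1 : 1 ≤ k := by omega
    have hdecomp : s.drop i = List.replicate k a ++ u := by
      have hrep : List.replicate k a = a :: List.replicate (rest.takeWhile (· == a)).length a := by
        rw [hkdef, Nat.add_comm, List.replicate_succ]
      rw [ht, hrep, ← htw]
      exact congrArg (a :: ·) hrest
    have hu : ∀ x, u.head? = some x → (x == a) = false := fun x hx =>
      head?_dropWhile_ne (fun b => b == a) rest x hx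
    have hile : i ≤ s.length := le_of_lt hlt
    have hlen2 : (s.drop i).length = s.length - i := List.length_drop
    have hlenk : k + u.length = s.length - i := by
      rw [← hlen2, hdecomp]; simp
    have hc : ∀ j, 1 ≤ j → j ≤ 4 → chunkA s i j = if j ≤ k then runVal a j else none :=
      fun j h1 h4 => chunkA_eval s a i j k u h1 h4 hile hdecomp hk1 hu
    have halt : tdAltLoop (s.drop i) acc = tdAltLoop u (acc ++ runPiece a k) := by
      rw [hdecomp]; exact alt_run_eval a k u acc hk1 hu
    have hdropj : ∀ j, j ≤ k → s.drop (i + j) = List.replicate (k - j) a ++ u := by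
      intro j hjk
      rw [← List.drop_drop, hdecomp,
        List.drop_append_of_le_length (by simp [hjk]), List.drop_replicate]
    rw [tdLoop, dif_pos hlt]
    cases hL : lettersDict.get? a with
    | none =>
      have he : ∀ j, 1 ≤ j → j ≤ 4 → chunkA s i j = none := by
        intro j h1 h4
        rw [hc j h1 h4]
        simp [runVal, hL]
      rw [he 4 (by omega) (by omega), he 3 (by omega) (by omega), he 2 (by omega) (by omega),
        he 1 (by omega) (by omega)]
      show tdLoop s (i + 1) acc = tdAltLoop (List.drop i s) acc
      rw [ih s (i + 1) acc (by omega), hdropj 1 hk1, halt]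
      have hrp : ∀ n, runPiece a n = "" := fun n => by simp [runPiece, hL]
      rcases Nat.eq_or_lt_of_le hk1 with h1 | h1
      · rw [← h1]
        simp [hrp, String.append_empty]
      · rw [alt_run_eval a (k - 1) u acc (by omega) hu]
        simp [hrp, String.append_empty]
    | some ls =>
      have hm1 := (letters_len a ls hL).1
      have hm4 := (letters_len a ls hL).2
      have hrv : ∀ j, runVal a j = if j ≤ ls.toList.length then
          some (String.ofList [ls.toList.getD (j - 1) ' ']) else none := fun j => by
        simp [runVal, hL]
      have hcj : ∀ j, 1 ≤ j → j ≤ 4 → chunkA s i j = if j ≤ min ls.toList.length k then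
          some (String.ofList [ls.toList.getD (j - 1) ' ']) else none := by
        intro j h1 h4
        rw [hc j h1 h4, hrv]
        split_ifs <;> first | rfl | (exfalso; omega)
      have hcont : tdLoop s (i + min ls.toList.length k)
          (acc ++ String.ofList [ls.toList.getD (min ls.toList.length k - 1) ' ']) =
          tdAltLoop (s.drop i) acc := by
        rw [ih s (i + min ls.toList.length k) _ (by omega),
          hdropj (min ls.toList.length k) (by omega), halt]
        rcases Nat.lt_or_ge ls.toList.length k with hkm | hkm
        · rw [Nat.min_eq_left (le_of_lt hkm),
            alt_run_eval a (k - ls.toList.length) u _ (by omega) hu,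
            runPiece_split a ls hL k hkm, String.append_assoc]
        · rw [Nat.min_eq_right hkm, Nat.sub_self, List.replicate_zero, List.nil_append,
            runPiece_small a ls hL k hk1 hkm]
      rcases (by omega : min ls.toList.length k = 1 ∨ min ls.toList.length k = 2 ∨
          min ls.toList.length k = 3 ∨ min ls.toList.length k = 4) with hj | hj | hj | hj <;>
        rw [hj] at hcont
      · rw [hcj 4 (by omega) (by omega), if_neg (by omega), hcj 3 (by omega) (by omega),
          if_neg (by omega), hcj 2 (by omega) (by omega), if_neg (by omega),
          hcj 1 (by omega) (by omega), if_pos (by omega)]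
        exact hcont
      · rw [hcj 4 (by omega) (by omega), if_neg (by omega), hcj 3 (by omega) (by omega),
          if_neg (by omega), hcj 2 (by omega) (by omega), if_pos (by omega)]
        exact hcont
      · rw [hcj 4 (by omega) (by omega), if_neg (by omega), hcj 3 (by omega) (by omega),
          if_pos (by omega)]
        exact hcont
      · rw [hcj 4 (by omega) (by omega), if_pos (by omega)]
        exact hcont

-- ===== VERDICT (by name: the statement is the Claim_ definition above) =====
theorem telephone_decipher_spec : Claim_equal_telephone_decipher := by
  intro s _
  unfold Spec_telephone_decipher telephone_decipher telephone_decipher_alt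
  rw [loop_eq (s.toList.length) s.toList 0 "" (by omega)]
  rfl
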